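-- pv_equiv track=rewrite | github.com/aaronberliner/GenomeCarver | cyborg/carveNode.py | trimLeft
-- ===== SOURCE A (Python) =====
-- def trimLeft(feature,restrictions):
-- 	start = feature[2]
-- 	for r in restrictions:
-- 		if start <= r[3]:
-- 			start = r[3]+1
-- 	if start > feature[3]:
-- 		start = feature[3]
-- 	return (feature[0],feature[1],start,feature[3],feature[4])
-- ===== SOURCE B (Python) =====
-- def trimLeft(feature, restrictions):
--     name, kind, begin, end, strand = feature
--     by_end = sorted(restrictions, key=lambda r: r[3], reverse=True)
--     if by_end:
--         top = by_end[0][3]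
--         if begin <= top:
--             begin = top + 1
--     return (name, kind, min(begin, end), end, strand)
-- ===== Notes on version B (the rewrite author's own statement) =====
-- stated objective: alternative
-- what changed: Replaces the running conditional-update accumulator loop by sort-then-head: sort restrictions by endpoint descending and compare start against the single top endpoint, then clamp with min; no accumulator pass remains in B.
import Mathlib
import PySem

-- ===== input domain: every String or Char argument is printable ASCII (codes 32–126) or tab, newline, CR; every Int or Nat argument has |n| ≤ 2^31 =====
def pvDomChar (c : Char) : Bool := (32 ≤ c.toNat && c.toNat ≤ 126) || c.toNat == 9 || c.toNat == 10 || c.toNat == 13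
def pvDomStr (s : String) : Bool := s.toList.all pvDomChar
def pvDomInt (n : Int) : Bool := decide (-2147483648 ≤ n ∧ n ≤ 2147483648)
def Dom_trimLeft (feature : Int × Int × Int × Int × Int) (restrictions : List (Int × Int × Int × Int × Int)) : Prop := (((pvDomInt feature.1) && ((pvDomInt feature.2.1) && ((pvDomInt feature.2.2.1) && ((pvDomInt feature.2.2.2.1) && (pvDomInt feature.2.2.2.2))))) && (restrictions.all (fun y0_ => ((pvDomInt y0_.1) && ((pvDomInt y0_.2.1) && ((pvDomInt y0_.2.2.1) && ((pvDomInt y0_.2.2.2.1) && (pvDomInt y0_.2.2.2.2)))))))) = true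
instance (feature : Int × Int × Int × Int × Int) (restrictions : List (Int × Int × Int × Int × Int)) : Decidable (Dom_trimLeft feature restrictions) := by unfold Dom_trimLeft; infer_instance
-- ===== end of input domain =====

-- B replaces A's running conditional-update loop by sort-then-head: sort endpoints descending, compare start to the single largest one (alternative structure, same return value).


-- ===== PORT A =====
def trimLeft (feature : Int × Int × Int × Int × Int) (restrictions : List (Int × Int × Int × Int × Int)) : Int × Int × Int × Int × Int :=
  let start := feature.2.2.1
  let start := restrictions.foldl
    (fun start r => if start ≤ r.2.2.2.1 then r.2.2.2.1 + 1 else start) start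
  let start := if start > feature.2.2.2.1 then feature.2.2.2.1 else start
  (feature.1, feature.2.1, start, feature.2.2.2.1, feature.2.2.2.2)

-- ===== PORT B =====
def trimLeft_alt (feature : Int × Int × Int × Int × Int) (restrictions : List (Int × Int × Int × Int × Int)) : Int × Int × Int × Int × Int :=
  match feature with
  | (name, kind, begin_, end_, strand) =>
    let byEnd := PySem.List.sorted restrictions (fun r => r.2.2.2.1) true
    let begin_ :=
      match byEnd with
      | [] => begin_
      | top :: _ => if begin_ ≤ top.2.2.2.1 then top.2.2.2.1 + 1 else begin_
    (name, kind, min begin_ end_, end_, strand)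

-- ===== PRECONDITION & SPEC =====
def Spec_trimLeft (feature : Int × Int × Int × Int × Int) (restrictions : List (Int × Int × Int × Int × Int)) (out : Int × Int × Int × Int × Int) : Prop := out = trimLeft_alt feature restrictions
instance (feature : Int × Int × Int × Int × Int) (restrictions : List (Int × Int × Int × Int × Int)) (out : Int × Int × Int × Int × Int) : Decidable (Spec_trimLeft feature restrictions out) := by unfold Spec_trimLeft; infer_instance

-- ===== CLAIM (what is proved, stated in full; the proofs are below) =====
def Claim_equal_trimLeft : Prop := ∀ (feature : Int × Int × Int × Int × Int) (restrictions : List (Int × Int × Int × Int × Int)), Dom_trimLeft feature restrictions → Spec_trimLeft feature restrictions (trimLeft feature restrictions)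

-- ===== LEMMAS AND PROOFS =====

-- Once A's accumulator strictly exceeds every remaining endpoint, the loop leaves it unchanged.
theorem loopA_stay (rs : List (Int × Int × Int × Int × Int)) (t : Int)
    (h : ∀ y ∈ rs.map (fun r => r.2.2.2.1), y < t) :
    rs.foldl (fun start r => if start ≤ r.2.2.2.1 then r.2.2.2.1 + 1 else start) t = t := by
  induction rs with
  | nil => rfl
  | cons r rs ih =>
      have hr : r.2.2.2.1 < t := h _ (by simp)
      rw [List.foldl_cons, if_neg (by omega)]
      exact ih (fun y hy => h y (List.mem_cons_of_mem _ (by simpa using hy)))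

-- A's loop result, given a bound m that dominates every endpoint and is attained.
theorem loopA_eq_of_max (s m : Int) (rs : List (Int × Int × Int × Int × Int))
    (hmem : m ∈ rs.map (fun r => r.2.2.2.1))
    (hub : ∀ y ∈ rs.map (fun r => r.2.2.2.1), y ≤ m) :
    rs.foldl (fun start r => if start ≤ r.2.2.2.1 then r.2.2.2.1 + 1 else start) s
      = if s ≤ m then m + 1 else s := by
  induction rs generalizing s with
  | nil => simp at hmem
  | cons r rs ih =>
      simp only [List.map_cons, List.mem_cons] at hmem hub
      have hr : r.2.2.2.1 ≤ m := hub _ (Or.inl rfl)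
      by_cases htail : m ∈ rs.map (fun r => r.2.2.2.1)
      · rw [List.foldl_cons, ih _ htail (fun y hy => hub y (Or.inr hy))]
        split_ifs <;> omega
      · have hm : m = r.2.2.2.1 := by tauto
        subst hm
        have hstrict : ∀ y ∈ rs.map (fun r => r.2.2.2.1), y < r.2.2.2.1 := by
          intro y hy
          have h1 : y ≤ r.2.2.2.1 := hub y (Or.inr hy)
          rcases lt_or_eq_of_le h1 with h | h
          · exact h
          · exact absurd (h ▸ hy) htail
        rw [List.foldl_cons]
        have ht : r.2.2.2.1 + 1 ≤ (if s ≤ r.2.2.2.1 then r.2.2.2.1 + 1 else s) := by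
          split_ifs <;> omega
        rw [loopA_stay rs _ (fun y hy => lt_of_lt_of_le (by have := hstrict y hy; omega) ht)]

theorem trimLeft_spec_aux (feature : Int × Int × Int × Int × Int)
    (restrictions : List (Int × Int × Int × Int × Int)) :
    trimLeft feature restrictions = trimLeft_alt feature restrictions := by
  obtain ⟨name, kind, begin_, end_, strand⟩ := feature
  simp only [trimLeft, trimLeft_alt]
  cases hs : PySem.List.sorted restrictions (fun r => r.2.2.2.1) true with
  | nil =>
      have : restrictions = [] := (PySem.List.sorted_eq_nil_iff _ _ _).mp hs
      subst this
      simp only [List.foldl_nil, min_def]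
      split_ifs <;> first | rfl | omega
  | cons top t =>
      have hmem : top.2.2.2.1 ∈ restrictions.map (fun r => r.2.2.2.1) := by
        have htop : top ∈ PySem.List.sorted restrictions (fun r => r.2.2.2.1) true := by
          rw [hs]; exact List.mem_cons_self
        exact List.mem_map_of_mem ((PySem.List.mem_sorted _ _ _ _).mp htop)
      have hub : ∀ y ∈ restrictions.map (fun r => r.2.2.2.1), y ≤ top.2.2.2.1 := by
        intro y hy
        rcases List.mem_map.mp hy with ⟨r, hr, rfl⟩
        exact PySem.List.key_head_sorted_rev_ge _ _ hs r hr
      rw [loopA_eq_of_max begin_ top.2.2.2.1 restrictions hmem hub]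
      simp only [min_def]
      split_ifs <;> first | rfl | omega

-- ===== VERDICT (by name: the statement is the Claim_ definition above) =====
theorem trimLeft_spec : Claim_equal_trimLeft := by
  intro feature restrictions _
  unfold Spec_trimLeft
  exact trimLeft_spec_aux feature restrictions
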